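-- pv_equiv track=rewrite | github.com/dahrs/translationBureauProject | utils/utilsString.py | fillCorrespondenceList
-- ===== SOURCE A (Python) =====
-- def fillCorrespondenceList(string1, string2, ngramSize=2):
--     """"""
--     correspondenceList = []
--     for indexChar, char in enumerate(string1[:len(string1) - (ngramSize - 1)]):
--         # if the string2 has not yet got to the end of the string
--         if len(string2) - (ngramSize - 1) > indexChar:
--             # get each ngram in the string1 and string2
--             ngramString1 = char if ngramSize == 1 else string1[indexChar:indexChar + ngramSize]
--             ngramString2 = string2[indexChar] if ngramSize == 1 else string2[indexChar:indexChar + ngramSize]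
--             # if there is a correspondence
--             if ngramString1 == ngramString2:
--                 correspondenceList.append(1)
--             else:
--                 correspondenceList.append(0)
--         # if there is no possible correspondence because the string2 has no more ngrams
--         else:
--             correspondenceList.append(None)
--     return correspondenceList
-- ===== SOURCE B (Python) =====
-- def fillCorrespondenceList(string1, string2, ngramSize=2):
--     """Per-character equality prefix sums, then one window-sum check per
--     position instead of building and comparing two slices."""
--     n1, n2 = len(string1), len(string2)
--     m = min(n1, n2)
--     # prefix[i] = number of matching character positions among the first i
--     prefix = [0]
--     total = 0
--     for a, b in zip(string1, string2):
--         total += a == b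
--         prefix.append(total)
--     out = []
--     for i in range(n1 - ngramSize + 1):
--         if i + ngramSize <= n2:
--             out.append(1 if prefix[i + ngramSize] - prefix[i] == ngramSize else 0)
--         else:
--             out.append(None)
--     return out
-- ===== Notes on version B (the rewrite author's own statement) =====
-- stated objective: faster
-- what changed: Replaces per-position slice building and slice comparison (O(k) work per window) by one precomputed prefix-sum array of per-character equalities with a constant-time window-sum test per position.
-- intended difference: For ngramSize between len(string1)+2 and 2*len(string1), A's negative slice bound wraps around so A still emits marks obtained by comparing truncated n-grams; B returns [] because no full n-gram fits in string1, which is the intended value. — e.g. on fillCorrespondenceList("ab", "abcd", 4): A returns [some 0], B returns []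
-- outside the precondition, e.g. on fillCorrespondenceList('ab', 'ab', 0): A returns [1, 1], B returns [1, 1, 1]; on fillCorrespondenceList('abc', 'abd', -1): A returns [1, 1, 1], B raises IndexError
import Mathlib
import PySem

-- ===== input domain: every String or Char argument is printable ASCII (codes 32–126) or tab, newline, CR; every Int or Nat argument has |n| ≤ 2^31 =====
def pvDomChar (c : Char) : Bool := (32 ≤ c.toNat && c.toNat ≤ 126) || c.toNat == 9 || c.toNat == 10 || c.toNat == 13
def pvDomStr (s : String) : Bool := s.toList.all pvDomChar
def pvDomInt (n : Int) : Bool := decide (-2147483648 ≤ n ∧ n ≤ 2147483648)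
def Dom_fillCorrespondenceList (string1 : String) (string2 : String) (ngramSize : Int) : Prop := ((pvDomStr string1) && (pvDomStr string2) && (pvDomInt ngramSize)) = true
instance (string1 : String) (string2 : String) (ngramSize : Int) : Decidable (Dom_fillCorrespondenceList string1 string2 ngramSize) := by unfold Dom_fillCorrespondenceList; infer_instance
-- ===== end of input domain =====

-- B replaces A's per-position slice building/comparison by prefix sums of per-character
-- equality with a constant-time window-sum test per position (objective: faster).

-- ===== PORT A =====
def fillCorrespondenceList (string1 : String) (string2 : String) (ngramSize : Int) : List (Option Int) :=
  let s1 := string1.toList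
  let s2 := string2.toList
  -- for indexChar, char in enumerate(string1[:len(string1) - (ngramSize - 1)]):
  let pre := PySem.List.slice s1 none (some ((s1.length : Int) - (ngramSize - 1)))
  (PySem.List.enumerate pre 0).foldl (fun correspondenceList p =>
    let indexChar := p.1
    let char := p.2
    if (s2.length : Int) - (ngramSize - 1) > indexChar then
      let ngramString1 : List Char :=
        if ngramSize == 1 then [char]
        else PySem.List.slice s1 (some indexChar) (some (indexChar + ngramSize))
      -- string2[indexChar]: in this branch indexChar < len(string2), so pyGet? never
      -- returns none; the [] default is unreachable (exact on every reachable input)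
      let ngramString2 : List Char :=
        if ngramSize == 1 then
          (match PySem.List.pyGet? s2 indexChar with | some c => [c] | none => [])
        else PySem.List.slice s2 (some indexChar) (some (indexChar + ngramSize))
      if ngramString1 == ngramString2 then correspondenceList ++ [some 1]
      else correspondenceList ++ [some 0]
    else correspondenceList ++ [none]) []

-- ===== PORT B =====
def fillCorrespondenceList_alt (string1 : String) (string2 : String) (ngramSize : Int) : List (Option Int) :=
  let l1 := string1.toList
  let l2 := string2.toList
  let n1 : Int := l1.length
  let n2 : Int := l2.length
  -- prefix[i] = number of matching character positions among the first i (running sum over zip)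
  let pref := (List.zipWith (fun a b => if a == b then (1 : Int) else 0) l1 l2).scanl (· + ·) 0
  (PySem.List.pyRange 0 (n1 - ngramSize + 1) 1).map (fun i =>
    if i + ngramSize ≤ n2 then
      -- list indices are in range here: 0 ≤ i and i + ngramSize ≤ min n1 n2, |prefix| = min n1 n2 + 1
      some (if pref.getD (i + ngramSize).toNat 0 - pref.getD i.toNat 0 == ngramSize then 1 else 0)
    else none)

-- ===== PRECONDITION & SPEC =====
-- Pre_ excludes ngramSize ≤ 0, where A compares empty or negatively-wrapped slices and its
-- loop bound degenerates (an artefact of Python slice arithmetic); B's window arithmetic is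
-- meaningless there (its count of window positions differs for ngramSize = 0 and it can
-- raise IndexError for negative ngramSize).
def Pre_fillCorrespondenceList (string1 : String) (string2 : String) (ngramSize : Int) : Prop :=
  1 ≤ ngramSize
instance (string1 : String) (string2 : String) (ngramSize : Int) : Decidable (Pre_fillCorrespondenceList string1 string2 ngramSize) := by unfold Pre_fillCorrespondenceList; infer_instance

def pvWitness_fillCorrespondenceList : String × String × Int := ("ab", "ac", 2)

-- For ngramSize between len(string1)+2 and 2*len(string1), A's negative slice bound wraps
-- around so A still emits marks obtained by comparing truncated n-grams; B returns []
-- because no full n-gram fits in string1, which is the intended value.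
def D_fillCorrespondenceList (string1 : String) (string2 : String) (ngramSize : Int) : Prop :=
  (string1.toList.length : Int) + 2 ≤ ngramSize ∧ ngramSize ≤ 2 * (string1.toList.length : Int)
instance (string1 : String) (string2 : String) (ngramSize : Int) : Decidable (D_fillCorrespondenceList string1 string2 ngramSize) := by unfold D_fillCorrespondenceList; infer_instance

def Spec_fillCorrespondenceList (string1 : String) (string2 : String) (ngramSize : Int) (out : List (Option Int)) : Prop := ¬ D_fillCorrespondenceList string1 string2 ngramSize → out = fillCorrespondenceList_alt string1 string2 ngramSize
instance (string1 : String) (string2 : String) (ngramSize : Int) (out : List (Option Int)) : Decidable (Spec_fillCorrespondenceList string1 string2 ngramSize out) := by unfold Spec_fillCorrespondenceList; infer_instance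

def pvDiffWitness_fillCorrespondenceList : String × String × Int := ("ab", "abcd", 4)
def pvDiffWitnessOut_fillCorrespondenceList : (List (Option Int)) × (List (Option Int)) := ([some 0], [])

-- ===== CLAIM (what is proved, stated in full; the proofs are below) =====
def Claim_unchanged_fillCorrespondenceList : Prop := ∀ (string1 : String) (string2 : String) (ngramSize : Int), Dom_fillCorrespondenceList string1 string2 ngramSize → Pre_fillCorrespondenceList string1 string2 ngramSize → Spec_fillCorrespondenceList string1 string2 ngramSize (fillCorrespondenceList string1 string2 ngramSize)
def Claim_changed_fillCorrespondenceList : Prop := Dom_fillCorrespondenceList (pvDiffWitness_fillCorrespondenceList.1) (pvDiffWitness_fillCorrespondenceList.2.1) (pvDiffWitness_fillCorrespondenceList.2.2) ∧ Pre_fillCorrespondenceList (pvDiffWitness_fillCorrespondenceList.1) (pvDiffWitness_fillCorrespondenceList.2.1) (pvDiffWitness_fillCorrespondenceList.2.2) ∧ D_fillCorrespondenceList (pvDiffWitness_fillCorrespondenceList.1) (pvDiffWitness_fillCorrespondenceList.2.1) (pvDiffWitness_fillCorrespondenceList.2.2) ∧ fillCorrespondenceList (pvDiffWitness_fillCorrespondenceList.1)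 (pvDiffWitness_fillCorrespondenceList.2.1) (pvDiffWitness_fillCorrespondenceList.2.2) = pvDiffWitnessOut_fillCorrespondenceList.1 ∧ fillCorrespondenceList_alt (pvDiffWitness_fillCorrespondenceList.1) (pvDiffWitness_fillCorrespondenceList.2.1) (pvDiffWitness_fillCorrespondenceList.2.2) = pvDiffWitnessOut_fillCorrespondenceList.2 ∧ pvDiffWitnessOut_fillCorrespondenceList.1 ≠ pvDiffWitnessOut_fillCorrespondenceList.2
def Claim_exact_fillCorrespondenceList : Prop := ∀ (string1 : String) (string2 : String) (ngramSize : Int), Dom_fillCorrespondenceList string1 string2 ngramSize → Pre_fillCorrespondenceList string1 string2 ngramSize → D_fillCorrespondenceList string1 string2 ngramSize → fillCorrespondenceList string1 string2 ngramSize ≠ fillCorrespondenceList_alt string1 string2 ngramSize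

-- ===== LEMMAS AND PROOFS =====

theorem pv_scanl_getD (xs : List Int) (t : Nat) (init : Int) (h : t ≤ xs.length) :
    (xs.scanl (· + ·) init).getD t 0 = init + (xs.take t).sum := by
  induction xs generalizing t init with
  | nil =>
    have : t = 0 := Nat.le_zero.mp h
    simp [this]
  | cons a xs ih =>
    cases t with
    | zero => simp
    | succ t =>
      simp only [List.scanl_cons, List.getD_cons_succ, List.take_succ_cons, List.sum_cons]
      rw [ih _ _ (by simpa using h)]
      ring

theorem pv_zip_sum_le (l1 l2 : List Char) :
    (List.zipWith (fun a b => if a == b then (1 : Int) else 0) l1 l2).sum ≤ (List.zipWith (fun a b => if a == b then (1 : Int) else 0) l1 l2).length := by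
  induction l1 generalizing l2 with
  | nil => simp
  | cons a l1 ih =>
    cases l2 with
    | nil => simp
    | cons b l2 =>
      simp only [List.zipWith_cons_cons, List.sum_cons, List.length_cons]
      have := ih l2
      split <;> push_cast <;> omega

-- A 0/1 window sums to its full length iff the two char lists agree positionwise.
theorem pv_zip_sum_eq_iff (u v : List Char) (h : u.length = v.length) :
    (List.zipWith (fun a b => if a == b then (1 : Int) else 0) u v).sum = u.length ↔ u = v := by
  induction u generalizing v with
  | nil => cases v <;> simp at h ⊢
  | cons a u ih =>
    cases v with
    | nil => simp at h
    | cons b v =>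
      have hlen : u.length = v.length := by simpa using h
      simp only [List.zipWith_cons_cons, List.sum_cons, List.length_cons]
      have hle := pv_zip_sum_le u v
      have hlz : (List.zipWith (fun a b => if a == b then (1 : Int) else 0) u v).length = min u.length v.length := by
        simp
      constructor
      · intro hs
        by_cases hab : a = b
        · simp only [hab, beq_self_eq_true, if_pos] at hs
          have : (List.zipWith (fun a b => if a == b then (1 : Int) else 0) u v).sum = u.length := by push_cast at hs ⊢; omega
          rw [ih v hlen] at this
          simp [hab, this]
        · have hne : (a == b) = false := beq_eq_false_iff_ne.mpr hab
          rw [hne] at hs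
          simp only [Bool.false_eq_true, if_false] at hs
          rw [hlz, hlen, min_self] at hle
          have : ((List.zipWith (fun a b => if a == b then (1 : Int) else 0) u v).sum : Int) ≤ (v.length : Int) := hle
          push_cast at hs
          rw [hlen] at hs
          omega
      · intro he
        injection he with h1 h2
        subst h1; subst h2
        have : u = u := rfl
        rw [← ih u (by rfl)] at this
        simp only [beq_self_eq_true, if_pos]
        push_cast
        omega

-- A's loop: three append-one branches collapse to a map.
theorem pv_foldl_three {A B : Type} (c : A → Prop) [DecidablePred c] (e : A → Bool) (u v w : B)
    (l : List A) (acc : List B) :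
    l.foldl (fun acc x => if c x then (if e x then acc ++ [u] else acc ++ [v]) else acc ++ [w]) acc
      = acc ++ l.map (fun x => if c x then (if e x then u else v) else w) := by
  induction l generalizing acc with
  | nil => simp
  | cons a l ih =>
    simp only [List.foldl_cons, List.map_cons]
    rw [ih]
    split_ifs <;> simp

-- prefix-sum window test = slice agreement
theorem pv_window (l1 l2 : List Char) (jN kN : Nat) (h1 : jN + kN ≤ l1.length) (h2 : jN + kN ≤ l2.length) :
    (((List.zipWith (fun a b => if a == b then (1 : Int) else 0) l1 l2).scanl (· + ·) 0).getD (jN + kN) 0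
        - ((List.zipWith (fun a b => if a == b then (1 : Int) else 0) l1 l2).scanl (· + ·) 0).getD jN 0 = (kN : Int))
      ↔ (l1.drop jN).take kN = (l2.drop jN).take kN := by
  have hxlen : (List.zipWith (fun a b => if a == b then (1 : Int) else 0) l1 l2).length = min l1.length l2.length := by
    simp
  rw [pv_scanl_getD _ _ _ (by omega), pv_scanl_getD _ _ _ (by omega), List.take_add, List.sum_append,
      List.drop_zipWith, List.take_zipWith, List.take_zipWith]
  have hu : ((l1.drop jN).take kN).length = kN := by simp; omega
  have hv : ((l2.drop jN).take kN).length = kN := by simp; omega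
  have hiff := pv_zip_sum_eq_iff ((l1.drop jN).take kN) ((l2.drop jN).take kN) (hu.trans hv.symm)
  rw [hu] at hiff
  constructor
  · intro h; exact hiff.mp (by omega)
  · intro h; have := hiff.mpr h; omega

theorem pv_main (s1 s2 : String) (k : Int) (hk : 1 ≤ k)
    (hnd : ¬ D_fillCorrespondenceList s1 s2 k) :
    fillCorrespondenceList s1 s2 k = fillCorrespondenceList_alt s1 s2 k := by
  have hD : ¬ ((s1.toList.length : Int) + 2 ≤ k ∧ k ≤ 2 * (s1.toList.length : Int)) := by
    unfold D_fillCorrespondenceList at hnd; exact hnd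
  obtain ⟨kn, rfl⟩ : ∃ n : Nat, k = (n : Int) := ⟨k.toNat, by omega⟩
  by_cases hbig : (s1.toList.length : Int) + 1 < (kn : Int)
  · -- k > 2*len(string1): both sides are empty
    have h2 : 2 * (s1.toList.length : Int) < (kn : Int) := by omega
    simp only [fillCorrespondenceList, fillCorrespondenceList_alt]
    have heq : ((s1.toList.length : Int) - ((kn : Int) - 1)) = -(((kn - 1 - s1.toList.length : Nat) : Int)) := by omega
    rw [heq, PySem.List.slice_to_neg_natCast _ _ (by omega)]
    have htz : s1.toList.length - (kn - 1 - s1.toList.length) = 0 := by omega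
    rw [htz, List.take_zero]
    rw [PySem.List.pyRange_one_eq_nil (by omega)]
    simp [PySem.List.enumerate_nil]
  · -- 1 ≤ k ≤ len(string1) + 1
    simp only [fillCorrespondenceList, fillCorrespondenceList_alt]
    have hflip : (s1.toList.length : Int) - ((kn : Int) - 1) = (s1.toList.length : Int) - kn + 1 := by ring
    rw [hflip, PySem.List.slice_to _ (by omega)]
    rw [pv_foldl_three]
    rw [PySem.List.enumerate_eq_map_pyRange _ 'a', List.map_map]
    have hmlen : PySem.List.len (s1.toList.take ((s1.toList.length : Int) - kn + 1).toNat)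
        = (s1.toList.length : Int) - kn + 1 := by
      rw [PySem.List.len_eq, List.length_take]
      omega
    rw [hmlen]
    simp only [List.nil_append]
    apply List.map_congr_left
    intro j hj
    rw [PySem.List.mem_pyRange_one] at hj
    obtain ⟨hj0, hjlt⟩ := hj
    obtain ⟨jn, rfl⟩ : ∃ n : Nat, j = (n : Int) := ⟨j.toNat, by omega⟩
    simp only [Function.comp]
    by_cases hc : (jn : Int) + kn ≤ (s2.toList.length : Int)
    · rw [if_pos (by omega : (s2.toList.length : Int) - ((kn : Int) - 1) > (jn : Int)), if_pos hc]
      have hjk1 : (jn : Int) + kn ≤ (s1.toList.length : Int) := by omega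
      by_cases hk1 : kn = 1
      · -- single-character branch of A
        subst hk1
        simp only [Nat.cast_one, beq_self_eq_true, if_pos]
        have hchar : PySem.List.pyGetD (s1.toList.take ((s1.toList.length : Int) - 1 + 1).toNat) (jn : Int) 'a'
            = s1.toList[jn]'(by omega) := by
          rw [PySem.List.pyGetD_natCast, List.getD_eq_getElem _ _ (by rw [List.length_take]; omega)]
          exact List.getElem_take
        have hlt2 : jn < s2.toList.length := by omega
        have hlt2' : jn < s2.length := by simpa using hlt2
        have hget : PySem.List.pyGet? s2.toList (jn : Int) = some (s2.toList[jn]'hlt2) := by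
          simp [PySem.List.pyGet?, PySem.List.pyIdx?, hlt2']
        rw [hchar, hget]
        have hwin := pv_window s1.toList s2.toList jn 1 (by omega) (by omega)
        have e1 : (s1.toList.drop jn).take 1 = [s1.toList[jn]'(by omega)] := by
          rw [List.drop_eq_getElem_cons (by omega : jn < s1.toList.length)]; rfl
        have e2 : (s2.toList.drop jn).take 1 = [s2.toList[jn]'hlt2] := by
          rw [List.drop_eq_getElem_cons hlt2]; rfl
        rw [e1, e2] at hwin
        push_cast at hwin
        rw [show ((jn : Int) + 1).toNat = jn + 1 from by omega, Int.toNat_natCast]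
        simp only [beq_iff_eq] at hwin ⊢
        split_ifs with ha hb hb
        · rfl
        · exact absurd (hwin.mpr ha) hb
        · exact absurd (hwin.mp hb) ha
        · rfl
      · -- slice branch of A
        have hne : (((kn : Nat) : Int) == (1 : Int)) = false := beq_eq_false_iff_ne.mpr (by omega)
        simp only [hne, Bool.false_eq_true, if_false]
        rw [PySem.List.slice_natCast_add s1.toList jn kn, PySem.List.slice_natCast_add s2.toList jn kn]
        rw [show ((jn : Int) + (kn : Int)).toNat = jn + kn from by omega, Int.toNat_natCast]
        have hwin := pv_window s1.toList s2.toList jn kn (by omega) (by omega)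
        simp only [beq_iff_eq] at hwin ⊢
        split_ifs with ha hb hb
        · rfl
        · exact absurd (hwin.mpr ha) hb
        · exact absurd (hwin.mp hb) ha
        · rfl
    · rw [if_neg (by omega : ¬ ((s2.toList.length : Int) - ((kn : Int) - 1) > (jn : Int))), if_neg hc]

-- ===== VERDICT (by name: the statement is the Claim_ definition above) =====
theorem fillCorrespondenceList_spec : Claim_unchanged_fillCorrespondenceList := by
  intro s1 s2 k _ hpre hnd
  exact pv_main s1 s2 k hpre hnd

theorem fillCorrespondenceList_changed : Claim_changed_fillCorrespondenceList := by
  unfold Claim_changed_fillCorrespondenceList; decide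

theorem fillCorrespondenceList_tight : Claim_exact_fillCorrespondenceList := by
  intro s1 s2 k _ hpre hD
  unfold D_fillCorrespondenceList at hD
  obtain ⟨hD1, hD2⟩ := hD
  have hk : (1 : Int) ≤ k := hpre
  obtain ⟨kn, rfl⟩ : ∃ n : Nat, k = (n : Int) := ⟨k.toNat, by omega⟩
  simp only [fillCorrespondenceList, fillCorrespondenceList_alt]
  rw [PySem.List.pyRange_one_eq_nil (by omega)]
  have heq : ((s1.toList.length : Int) - ((kn : Int) - 1)) = -(((kn - 1 - s1.toList.length : Nat) : Int)) := by omega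
  rw [heq, PySem.List.slice_to_neg_natCast _ _ (by omega)]
  rw [pv_foldl_three]
  simp only [List.map_nil, List.nil_append]
  intro hcon
  have hlen := congrArg List.length hcon
  simp only [List.length_map, PySem.List.length_enumerate, List.length_take, List.length_nil] at hlen
  omega
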